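-- pv_equiv track=rewrite | github.com/Hyeonjunnn/CodingTest | 프로그래머스/2/42578. 의상/의상.py | solution
-- ===== SOURCE A (Python) =====
-- def solution(clothes):
--
--     clothes_dict = dict()
--
--     for cloth, kind in clothes:
--         if (kind in clothes_dict):
--             clothes_dict[kind] += 1
--         else:
--             clothes_dict[kind] = 1
--
--     answer = 1
--     for key in clothes_dict:
--         answer *= (clothes_dict[key] + 1)
--
--     answer -= 1
--
--     return answer
-- ===== SOURCE B (Python) =====
-- def solution(clothes):
--     # Sort the category names, then multiply (run length + 1) over the runs
--     # of equal categories in one linear scan; subtract 1 at the end.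
--     kinds = sorted(k for _, k in clothes)
--     answer = 1
--     n = len(kinds)
--     i = 0
--     while i < n:
--         j = i + 1
--         while j < n and kinds[j] == kinds[i]:
--             j += 1
--         answer *= j - i + 1
--         i = j
--     return answer - 1
-- ===== Notes on version B (the rewrite author's own statement) =====
-- stated objective: alternative
-- what changed: Replaces the dictionary of per-category counts with a sort of the category names followed by a single run-length scan that multiplies (run length + 1) over maximal runs of equal categories.
import Mathlib
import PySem

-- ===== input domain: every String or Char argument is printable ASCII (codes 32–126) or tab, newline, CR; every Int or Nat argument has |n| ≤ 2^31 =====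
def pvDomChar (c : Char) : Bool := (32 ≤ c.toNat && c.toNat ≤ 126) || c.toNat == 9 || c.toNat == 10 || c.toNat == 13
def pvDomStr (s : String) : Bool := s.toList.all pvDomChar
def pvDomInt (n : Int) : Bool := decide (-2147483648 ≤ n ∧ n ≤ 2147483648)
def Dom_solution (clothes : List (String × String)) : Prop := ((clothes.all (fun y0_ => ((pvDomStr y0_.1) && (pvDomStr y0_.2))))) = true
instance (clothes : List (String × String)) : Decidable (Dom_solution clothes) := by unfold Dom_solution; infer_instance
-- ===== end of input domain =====

-- B replaces A's counting dictionary by sorting the category names and doing one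
-- run-length scan, multiplying (run length + 1) over maximal runs (alternative
-- decomposition, not claimed faster). Equal return value on every input.

-- ===== PORT A =====
-- for cloth, kind in clothes: if kind in d: d[kind] += 1 else: d[kind] = 1
def solutionDict (clothes : List (String × String)) : PySem.Dict String Int :=
  clothes.foldl
    (fun d p =>
      if d.contains p.2 then d.insert p.2 (d.getD p.2 0 + 1)
      else d.insert p.2 1)
    PySem.Dict.empty

def solution (clothes : List (String × String)) : Int :=
  let d := solutionDict clothes
  let answer := d.keys.foldl (fun a k => a * (d.getD k 0 + 1)) 1
  answer - 1

-- ===== PORT B =====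
-- the outer 'while i < n' becomes recursion on the remaining suffix; the inner
-- 'while j < n and kinds[j] == kinds[i]' counts the run = takeWhile length
def prodRuns : List String → Int
  | [] => 1
  | k :: rest =>
      let n := (rest.takeWhile (fun x => x == k)).length
      ((n : Int) + 2) * prodRuns (rest.drop n)
  termination_by l => l.length
  decreasing_by
    simp [List.length_drop]

def solution_alt (clothes : List (String × String)) : Int :=
  let kinds := PySem.List.sorted (clothes.map (fun c => c.2)) (fun x => x) false
  prodRuns kinds - 1

-- ===== PRECONDITION & SPEC =====
def Spec_solution (clothes : List (String × String)) (out : Int) : Prop := out = solution_alt clothes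
instance (clothes : List (String × String)) (out : Int) : Decidable (Spec_solution clothes out) := by unfold Spec_solution; infer_instance

-- ===== CLAIM (what is proved, stated in full; the proofs are below) =====
def Claim_equal_solution : Prop := ∀ (clothes : List (String × String)), Dom_solution clothes → Spec_solution clothes (solution clothes)

-- ===== LEMMAS AND PROOFS =====

-- canonical value: product of (count k + 1) over the distinct categories
def canonF (l : List String) : Int := ∏ k ∈ l.toFinset, ((l.count k : Int) + 1)

theorem drop_length_takeWhile (p : String → Bool) (l : List String) :
    l.drop (l.takeWhile p).length = l.dropWhile p := by
  induction l with
  | nil => simp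
  | cons x t ih => by_cases h : p x <;> simp [h, ih]

theorem foldl_mul_eq_prod (l : List String) (f : String → Int) (i : Int) :
    l.foldl (fun a k => a * f k) i = i * (l.map f).prod := by
  induction l generalizing i with
  | nil => simp
  | cons x t ih => simp [List.foldl_cons, ih, mul_assoc]

theorem solutionDict_eq_counter (clothes : List (String × String)) :
    solutionDict clothes = PySem.Dict.counter (clothes.map (fun c => c.2)) := by
  unfold solutionDict
  rw [← PySem.Dict.foldl_insert_getD_add_one_eq_counter, List.foldl_map]
  apply PySem.List.foldl_congr_mem
  intro d p _
  by_cases h : d.contains p.2 = true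
  · simp [h]
  · have h' : d.contains p.2 = false := by simpa using h
    rw [PySem.Dict.getD_of_not_contains d 0 h']
    simp [h']

theorem solution_eq_canon (clothes : List (String × String)) :
    solution clothes = canonF (clothes.map (fun c => c.2)) - 1 := by
  show (solutionDict clothes).keys.foldl
      (fun a k => a * ((solutionDict clothes).getD k 0 + 1)) 1 - 1 = _
  rw [solutionDict_eq_counter]
  set kinds := clothes.map (fun c => c.2) with hk
  have hcongr : (PySem.Dict.counter kinds).keys.foldl
      (fun a k => a * ((PySem.Dict.counter kinds).getD k 0 + 1)) 1
      = (PySem.Dict.counter kinds).keys.foldl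
      (fun a k => a * ((kinds.count k : Int) + 1)) 1 := by
    apply PySem.List.foldl_congr_mem
    intro a k _
    rw [PySem.Dict.getD_counter]
  rw [hcongr, foldl_mul_eq_prod, one_mul, PySem.Dict.keys_counter]
  congr 1
  rw [canonF.eq_def, ← List.prod_toFinset _ (PySem.Set.nodup_ofList kinds)]
  have : (PySem.Set.ofList kinds).toFinset = kinds.toFinset := by
    apply Finset.ext
    intro x
    simp [List.mem_toFinset, PySem.Set.mem_ofList]
  rw [this]

-- in a ≤-sorted list whose elements are all ≥ k, the dropWhile (== k) part has no k
theorem not_mem_dropWhile_beq (k : String) :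
    ∀ (l : List String), l.Pairwise (· ≤ ·) → (∀ x ∈ l, k ≤ x) →
      k ∉ l.dropWhile (fun x => x == k)
  | [], _, _ => by simp
  | x :: t, hpw, hge => by
    by_cases h : (x == k) = true
    · rw [List.dropWhile_cons, if_pos h]
      exact not_mem_dropWhile_beq k t (List.pairwise_cons.mp hpw).2
        (fun y hy => hge y (List.mem_cons_of_mem x hy))
    · rw [List.dropWhile_cons, if_neg h]
      intro hmem
      have hxk : x ≠ k := by simpa using h
      rcases List.mem_cons.mp hmem with hkx | hkt
      · exact hxk hkx.symm
      · have hxle : x ≤ k := (List.pairwise_cons.mp hpw).1 k hkt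
        have hkle : k ≤ x := hge x (List.mem_cons_self)
        exact hxk (le_antisymm hxle hkle)

theorem prodRuns_sorted : ∀ (s : List String), s.Pairwise (· ≤ ·) → prodRuns s = canonF s
  | [], _ => by simp [prodRuns, canonF]
  | k :: rest, hs => by
      rw [prodRuns]
      have hdrop : rest.drop (rest.takeWhile (fun x => x == k)).length
          = rest.dropWhile (fun x => x == k) := drop_length_takeWhile _ rest
      rw [hdrop]
      set t := rest.takeWhile (fun x => x == k) with ht
      set d := rest.dropWhile (fun x => x == k) with hd
      have hsplit : rest = t ++ d := (List.takeWhile_append_dropWhile).symm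
      have htk : ∀ x ∈ t, x = k := by
        intro x hx
        have := List.mem_takeWhile_imp (ht ▸ hx)
        simpa using this
      have hrest_pw : rest.Pairwise (· ≤ ·) := (List.pairwise_cons.mp hs).2
      have hd_pw : d.Pairwise (· ≤ ·) := hrest_pw.sublist (List.dropWhile_sublist _)
      have hknotd : k ∉ d :=
        not_mem_dropWhile_beq k rest hrest_pw (fun x hx => (List.pairwise_cons.mp hs).1 x hx)
      have hlen : d.length < (k :: rest).length := by
        have := (List.dropWhile_sublist (l := rest) (fun x => x == k)).length_le
        rw [← hd] at this
        simp only [List.length_cons]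
        omega
      rw [prodRuns_sorted d hd_pw]
      have hcount_t : t.count k = t.length := by
        rw [List.count_eq_length]
        intro b hb
        exact (htk b hb).symm
      have hcountk : (k :: rest).count k = t.length + 1 := by
        have hrest : rest.count k = t.length := by
          rw [hsplit, List.count_append, hcount_t, List.count_eq_zero.mpr hknotd]
          omega
        rw [List.count_cons_self, hrest]
      have hmem : ∀ x, x ∈ (k :: rest) ↔ x = k ∨ x ∈ d := by
        intro x
        rw [hsplit]
        constructor
        · intro hx
          rcases List.mem_cons.mp hx with hx | hx
          · exact Or.inl hx
          · rcases List.mem_append.mp hx with hx | hx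
            · exact Or.inl (htk x hx)
            · exact Or.inr hx
        · rintro (hx | hx)
          · exact hx ▸ List.mem_cons_self
          · exact List.mem_cons_of_mem _ (List.mem_append.mpr (Or.inr hx))
      have hfin : (k :: rest).toFinset = insert k d.toFinset := by
        apply Finset.ext
        intro x
        rw [Finset.mem_insert, List.mem_toFinset, List.mem_toFinset, hmem]
      have hcongr : ∀ x ∈ d.toFinset,
          (((k :: rest).count x : Int) + 1) = ((d.count x : Int) + 1) := by
        intro x hx
        have hxd : x ∈ d := List.mem_toFinset.mp hx
        have hxk : x ≠ k := fun h => hknotd (h ▸ hxd)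
        have hxt : x ∉ t := fun h => hxk (htk x h)
        rw [List.count_cons_of_ne (Ne.symm hxk), hsplit, List.count_append,
            List.count_eq_zero.mpr hxt]
        simp
      simp only [canonF]
      rw [hfin, Finset.prod_insert (fun h => hknotd (List.mem_toFinset.mp h)),
        Finset.prod_congr rfl hcongr, hcountk]
      push_cast
      ring
  termination_by s => s.length
  decreasing_by
    have := (List.dropWhile_sublist (l := rest) (fun x => x == k)).length_le
    simp only [List.length_cons]
    omega

theorem solution_alt_eq_canon (clothes : List (String × String)) :
    solution_alt clothes = canonF (clothes.map (fun c => c.2)) - 1 := by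
  set kinds := clothes.map (fun c => c.2) with hk
  show prodRuns (PySem.List.sorted kinds (fun x => x) false) - 1 = _
  have hperm : (PySem.List.sorted kinds (fun x => x) false).Perm kinds :=
    PySem.List.sorted_perm kinds (fun x => x) false
  have hpw : (PySem.List.sorted kinds (fun x => x) false).Pairwise (· ≤ ·) := by
    have := PySem.List.sorted_pairwise kinds (fun x => x)
    simpa using this
  rw [prodRuns_sorted _ hpw]
  congr 1
  rw [canonF.eq_def, canonF.eq_def, List.toFinset_eq_of_perm _ _ hperm]
  exact Finset.prod_congr rfl (fun x _ => by rw [hperm.count_eq])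

-- ===== VERDICT (by name: the statement is the Claim_ definition above) =====
theorem solution_spec : Claim_equal_solution := by
  intro clothes _
  unfold Spec_solution
  rw [solution_eq_canon, solution_alt_eq_canon]
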